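-- pv_equiv track=rewrite | github.com/snyke7/aoc2023 | aoc2024/day14.py | positions_to_str
-- ===== SOURCE A (Python) =====
-- def positions_to_str(robot_positions, dimensions):
--     return '\n'.join((
--         ''.join((
--             str(robot_positions.count((x, y)))
--             if (x, y) in robot_positions else '.'
--             for y in range(dimensions[1])
--         ))
--         for x in range(dimensions[0])
--     ))
-- ===== SOURCE B (Python) =====
-- def positions_to_str(robot_positions, dimensions):
--     w, h = dimensions[0], dimensions[1]
--     lines = []
--     for x in range(w):
--         ys = sorted(y for (px, y) in robot_positions if px == x and 0 <= y < h)
--         parts = []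
--         prev = 0
--         i = 0
--         n = len(ys)
--         while i < n:
--             y = ys[i]
--             j = i
--             while j < n and ys[j] == y:
--                 j += 1
--             parts.append('.' * (y - prev))
--             parts.append(str(j - i))
--             prev = y + 1
--             i = j
--         parts.append('.' * (h - prev))
--         lines.append(''.join(parts))
--     return '\n'.join(lines)
-- ===== Notes on version B (the rewrite author's own statement) =====
-- stated objective: faster
-- what changed: B never tests membership or counts at a grid cell: per row it collects and sorts the robot y-coordinates, run-length-groups equal values, and emits the row as dot-gap strings interleaved with group sizes, so the rendering is a sweep over sorted robot data instead of A's per-cell scan of the whole robot list.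
import Mathlib
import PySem

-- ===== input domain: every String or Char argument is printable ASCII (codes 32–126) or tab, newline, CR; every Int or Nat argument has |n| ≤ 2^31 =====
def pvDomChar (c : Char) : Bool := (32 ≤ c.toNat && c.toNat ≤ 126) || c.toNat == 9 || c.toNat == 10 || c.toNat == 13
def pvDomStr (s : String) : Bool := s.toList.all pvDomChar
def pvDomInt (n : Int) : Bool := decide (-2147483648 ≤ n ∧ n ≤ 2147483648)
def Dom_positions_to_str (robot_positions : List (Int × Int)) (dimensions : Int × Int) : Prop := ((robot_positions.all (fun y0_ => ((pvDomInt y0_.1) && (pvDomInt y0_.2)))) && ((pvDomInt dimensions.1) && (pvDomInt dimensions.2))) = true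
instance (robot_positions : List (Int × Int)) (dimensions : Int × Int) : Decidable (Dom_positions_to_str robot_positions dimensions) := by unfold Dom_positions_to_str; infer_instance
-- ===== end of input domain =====

-- B renders each row as a run-length sweep over the sorted robot y-coordinates of that row
-- (dot gaps interleaved with group sizes) instead of A's per-cell membership test and count
-- over the whole robot list (objective: faster).

-- ===== PORT A =====
def positions_to_str (robot_positions : List (Int × Int)) (dimensions : Int × Int) : String :=
  PySem.Str.join "\n" ((PySem.List.pyRange 0 dimensions.1 1).map (fun x =>
    PySem.Str.join "" ((PySem.List.pyRange 0 dimensions.2 1).map (fun y =>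
      if (x, y) ∈ robot_positions
      then PySem.Int.toStr ((PySem.List.count robot_positions (x, y) : Nat) : Int)
      else "."))))

-- ===== PORT B =====
-- '.' * k  (Python gives '' for k ≤ 0; toNat clamps the same way)
def pvDots (k : Int) : String := String.ofList (List.replicate k.toNat '.')

-- the inner while loops of Source B: group the equal head, emit gap + group size, recurse on the rest
def pvRenderRow (h : Int) : List Int → Int → List String
  | [], prev => [pvDots (h - prev)]
  | y :: rest, prev =>
      pvDots (y - prev) ::
      PySem.Int.toStr (((1 + (rest.takeWhile (· == y)).length : Nat) : Int)) ::
      pvRenderRow h (rest.dropWhile (· == y)) (y + 1)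
  termination_by ys _ => ys.length
  decreasing_by
    exact Nat.lt_succ_of_le (List.length_dropWhile_le _ _)

def positions_to_str_alt (robot_positions : List (Int × Int)) (dimensions : Int × Int) : String :=
  PySem.Str.join "\n" ((PySem.List.pyRange 0 dimensions.1 1).map (fun x =>
    PySem.Str.join "" (pvRenderRow dimensions.2
      (PySem.List.sorted (robot_positions.filterMap (fun p =>
        if p.1 == x && (decide (0 ≤ p.2) && decide (p.2 < dimensions.2)) then some p.2 else none))
        (fun y => y) false)
      0)))

-- ===== PRECONDITION & SPEC =====
def Spec_positions_to_str (robot_positions : List (Int × Int)) (dimensions : Int × Int) (out : String) : Prop := out = positions_to_str_alt robot_positions dimensions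
instance (robot_positions : List (Int × Int)) (dimensions : Int × Int) (out : String) : Decidable (Spec_positions_to_str robot_positions dimensions out) := by unfold Spec_positions_to_str; infer_instance

-- ===== CLAIM (what is proved, stated in full; the proofs are below) =====
def Claim_equal_positions_to_str : Prop := ∀ (robot_positions : List (Int × Int)) (dimensions : Int × Int), Dom_positions_to_str robot_positions dimensions → Spec_positions_to_str robot_positions dimensions (positions_to_str robot_positions dimensions)

-- ===== LEMMAS AND PROOFS =====

theorem pv_join_empty_eq_flatten (l : List (List Char)) :
    PySem.Chars.join [] l = l.flatten := by
  induction l with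
  | nil => simp [PySem.Chars.join_nil]
  | cons a t ih =>
    cases t with
    | nil => simp [PySem.Chars.join_singleton]
    | cons b u => rw [PySem.Chars.join_cons_cons, List.flatten_cons, ← ih]; simp

theorem pv_flatten_dots (l : List Int) :
    (l.map (fun _ => ['.'])).flatten = List.replicate l.length '.' := by
  induction l with
  | nil => simp
  | cons a t ih => simp [List.replicate_succ]

-- in a ≤-sorted list whose elements are all ≥ y, the equal-y prefix carries every copy of y
theorem pv_group_count (y : Int) (rest : List Int) (hs : rest.Pairwise (· ≤ ·))
    (hge : ∀ r ∈ rest, y ≤ r) :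
    (rest.takeWhile (· == y)).length = rest.count y ∧
    (∀ z ∈ rest.dropWhile (· == y), y < z) := by
  induction rest with
  | nil => simp
  | cons r t ih =>
    rcases List.pairwise_cons.mp hs with ⟨hrt, ht⟩
    by_cases hr : r = y
    · subst hr
      have := ih ht (fun z hz => hge z (List.mem_cons_of_mem _ hz))
      simp only [List.takeWhile_cons, List.dropWhile_cons, beq_self_eq_true, if_true,
        List.count_cons, List.length_cons]
      constructor
      · simp [this.1]
      · exact this.2
    · have hlt : y < r := lt_of_le_of_ne (hge r (List.mem_cons_self)) (Ne.symm hr)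
      have hb : (r == y) = false := by simp [hr]
      simp only [List.takeWhile_cons, List.dropWhile_cons, hb,
        Bool.false_eq_true, if_false, List.length_nil]
      have hy0 : y ∉ r :: t := by
        intro hmem
        rcases List.mem_cons.mp hmem with hh | hh
        · exact hr hh.symm
        · exact absurd (hrt y hh) (by omega)
      constructor
      · rw [List.count_eq_zero.mpr hy0]
      · intro z hz
        rcases List.mem_cons.mp hz with hh | hh
        · omega
        · exact lt_of_lt_of_le hlt (hrt z hh)

-- core: the run-length sweep renders exactly A's per-cell count string over [prev, h)
theorem pv_render_eq (h : Int) (ys : List Int) (hs : ys.Pairwise (· ≤ ·)) (prev : Int)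
    (hb : ∀ y ∈ ys, prev ≤ y ∧ y < h) :
    ((pvRenderRow h ys prev).map String.toList).flatten =
    ((PySem.List.pyRange prev h 1).map (fun y =>
      if ys.count y ≠ 0 then PySem.Int.toChars ((ys.count y : Nat) : Int) else ['.'])).flatten := by
  match ys with
  | [] =>
    simp only [pvRenderRow, List.map_cons, List.map_nil, List.flatten]
    have : ∀ y ∈ PySem.List.pyRange prev h 1,
        (if ([] : List Int).count y ≠ 0 then PySem.Int.toChars (((([] : List Int).count y : Nat)) : Int) else ['.']) = ['.'] := by
      intro y _; simp
    rw [List.map_congr_left this, pv_flatten_dots, PySem.List.length_pyRange_one]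
    simp [pvDots]
  | y :: rest =>
    have hy := hb y (List.mem_cons_self)
    rcases List.pairwise_cons.mp hs with ⟨hyr, hrest⟩
    have hgrp := pv_group_count y rest hrest hyr
    have hsplit : PySem.List.pyRange prev h 1 =
        PySem.List.pyRange prev y 1 ++ (y :: PySem.List.pyRange (y + 1) h 1) := by
      rw [PySem.List.pyRange_one_append prev y h hy.1 (le_of_lt hy.2),
        PySem.List.pyRange_one_cons hy.2]
    -- the recursive call
    set rest' := rest.dropWhile (· == y) with hrest'
    have hsub : List.Sublist rest' rest := List.dropWhile_sublist _
    have hs' : rest'.Pairwise (· ≤ ·) := hrest.sublist hsub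
    have hb' : ∀ z ∈ rest', y + 1 ≤ z ∧ z < h := by
      intro z hz
      exact ⟨by have := hgrp.2 z hz; omega, (hb z (List.mem_cons_of_mem _ (hsub.mem hz))).2⟩
    have ih := pv_render_eq h rest' hs' (y + 1) hb'
    rw [hsplit]
    simp only [pvRenderRow, List.map_cons, List.map_append, List.flatten_cons, List.flatten_append]
    -- leading dots segment
    have hdots : ((PySem.List.pyRange prev y 1).map (fun z =>
        if (y :: rest).count z ≠ 0 then PySem.Int.toChars (((y :: rest).count z : Nat) : Int) else ['.'])).flatten
        = List.replicate (y - prev).toNat '.' := by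
      have : ∀ z ∈ PySem.List.pyRange prev y 1,
          (if (y :: rest).count z ≠ 0 then PySem.Int.toChars (((y :: rest).count z : Nat) : Int) else ['.']) = ['.'] := by
        intro z hz
        have hzy : z < y := (PySem.List.mem_pyRange_one.mp hz).2
        have : (y :: rest).count z = 0 := by
          rw [List.count_eq_zero]
          intro hmem
          rcases List.mem_cons.mp hmem with hh | hh
          · omega
          · exact absurd (hyr z hh) (by omega)
        simp [this]
      rw [List.map_congr_left this, pv_flatten_dots, PySem.List.length_pyRange_one]
    -- the cell at y
    have hcell : (y :: rest).count y = 1 + (rest.takeWhile (· == y)).length := by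
      rw [List.count_cons]
      simp [hgrp.1]
      omega
    -- tail cells agree with counts in rest'
    have htail : ∀ z ∈ PySem.List.pyRange (y + 1) h 1, (y :: rest).count z = rest'.count z := by
      intro z hz
      have hzy : y + 1 ≤ z := (PySem.List.mem_pyRange_one.mp hz).1
      have hsplit2 : rest = rest.takeWhile (· == y) ++ rest' := (List.takeWhile_append_dropWhile).symm
      rw [List.count_cons, hsplit2, List.count_append]
      have : (rest.takeWhile (· == y)).count z = 0 := by
        rw [List.count_eq_zero]
        intro hmem
        have := List.mem_takeWhile_imp hmem
        simp at this
        omega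
      have hyz : ¬ (y = z) := by omega
      simp [this, hyz]
    rw [hdots]
    congr 1
    · simp [pvDots]
    congr 1
    · have hne : (y :: rest).count y ≠ 0 := by
        simp [List.count_cons_self]
      rw [if_pos hne, PySem.Int.toList_toStr, hcell]
    · rw [ih]
      refine congrArg _ (List.map_congr_left fun z hz => ?_)
      rw [htail z hz]
  termination_by ys.length
  decreasing_by
    exact Nat.lt_succ_of_le (List.length_dropWhile_le _ _)

-- the filtered-and-counted y's of one row are A's pair counts
theorem pv_count_filtered (rp : List (Int × Int)) (x h y : Int) (h0 : 0 ≤ y) (h1 : y < h) :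
    (rp.filterMap (fun p =>
      if p.1 == x && (decide (0 ≤ p.2) && decide (p.2 < h)) then some p.2 else none)).count y
    = rp.count (x, y) := by
  induction rp with
  | nil => simp
  | cons p t ih =>
    by_cases hc : p.1 = x ∧ 0 ≤ p.2 ∧ p.2 < h
    · have hcb : (p.1 == x && (decide (0 ≤ p.2) && decide (p.2 < h))) = true := by
        simp [hc.1, hc.2.1, hc.2.2]
      rw [List.filterMap_cons, if_pos hcb, List.count_cons, List.count_cons, ih]
      by_cases hpy : p.2 = y
      · have hp : p = (x, y) := by
          obtain ⟨p1, p2⟩ := p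
          simp only [Prod.mk.injEq]
          exact ⟨hc.1, hpy⟩
        have e1 : (p.2 == y) = true := by simp [hpy]
        have e2 : (p == (x, y)) = true := by simp [hp]
        rw [e1, e2]
      · have hp : p ≠ (x, y) := by intro hE; exact hpy (by rw [hE])
        have e1 : (p.2 == y) = false := by simp [hpy]
        have e2 : (p == (x, y)) = false := by simp [hp]
        rw [e1, e2]
    · have hcb : (p.1 == x && (decide (0 ≤ p.2) && decide (p.2 < h))) = false := by
        rcases not_and_or.mp hc with hh | hh
        · simp [hh]
        · rcases not_and_or.mp hh with hh2 | hh2 <;> simp [hh2]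
      have hne : p ≠ (x, y) := by
        intro hE; subst hE; exact hc ⟨rfl, h0, h1⟩
      rw [List.filterMap_cons, if_neg (by simp [hcb]), List.count_cons, ih]
      have e2 : (p == (x, y)) = false := by simp [hne]
      rw [e2]
      simp

theorem pv_row_eq (rp : List (Int × Int)) (x h : Int) :
    PySem.Str.join "" ((PySem.List.pyRange 0 h 1).map (fun y =>
      if (x, y) ∈ rp then PySem.Int.toStr ((PySem.List.count rp (x, y) : Nat) : Int) else ".")) =
    PySem.Str.join "" (pvRenderRow h
      (PySem.List.sorted (rp.filterMap (fun p =>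
        if p.1 == x && (decide (0 ≤ p.2) && decide (p.2 < h)) then some p.2 else none))
        (fun y => y) false) 0) := by
  set fl := rp.filterMap (fun p =>
    if p.1 == x && (decide (0 ≤ p.2) && decide (p.2 < h)) then some p.2 else none) with hfl
  set ys := PySem.List.sorted fl (fun y => y) false with hys
  have hperm : ys.Perm fl := PySem.List.sorted_perm fl (fun y => y) false
  have hcnt : ∀ y : Int, 0 ≤ y → y < h → ys.count y = rp.count (x, y) := by
    intro y h0 h1
    rw [hperm.count_eq, hfl, pv_count_filtered rp x h y h0 h1]
  have hsorted : ys.Pairwise (· ≤ ·) := PySem.List.sorted_pairwise fl (fun y => y)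
  have hbnd : ∀ y ∈ ys, 0 ≤ y ∧ y < h := by
    intro y hy
    have : y ∈ fl := hperm.mem_iff.mp hy
    rcases List.mem_filterMap.mp this with ⟨p, _, hp⟩
    by_cases hc : (p.1 == x && (decide (0 ≤ p.2) && decide (p.2 < h))) = true
    · rw [if_pos hc] at hp
      simp only [Bool.and_eq_true, beq_iff_eq, decide_eq_true_eq] at hc
      cases hp; exact ⟨hc.2.1, hc.2.2⟩
    · rw [if_neg hc] at hp; cases hp
  have hmain := pv_render_eq h ys hsorted 0 hbnd
  -- both sides as Strings: compare their toLists
  apply String.toList_inj.mp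
  have lhs : (PySem.Str.join "" ((PySem.List.pyRange 0 h 1).map (fun y =>
      if (x, y) ∈ rp then PySem.Int.toStr ((PySem.List.count rp (x, y) : Nat) : Int) else "."))).toList
      = ((PySem.List.pyRange 0 h 1).map (fun y =>
        if ys.count y ≠ 0 then PySem.Int.toChars ((ys.count y : Nat) : Int) else ['.'])).flatten := by
    rw [PySem.Str.toList_join, show ("".toList) = ([] : List Char) from rfl, pv_join_empty_eq_flatten]
    · congr 1
      rw [List.map_map]
      refine List.map_congr_left fun y hy => ?_
      simp only [Function.comp_apply]
      have hyb := PySem.List.mem_pyRange_one.mp hy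
      have hcy := hcnt y hyb.1 hyb.2
      by_cases hm : (x, y) ∈ rp
      · have hne : rp.count (x, y) ≠ 0 := by
          simp [List.count_eq_zero]; exact hm
        have hcy' : ys.count y ≠ 0 := by rw [hcy]; exact hne
        rw [if_pos hm, if_pos hcy', PySem.Int.toList_toStr, PySem.List.count_eq, hcy]
      · have h0 : rp.count (x, y) = 0 := List.count_eq_zero.mpr hm
        have hcy' : ¬ (ys.count y ≠ 0) := by rw [hcy, h0]; simp
        rw [if_neg hm, if_neg hcy']
        rfl
  have rhs : (PySem.Str.join "" (pvRenderRow h ys 0)).toList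
      = ((pvRenderRow h ys 0).map String.toList).flatten := by
    rw [PySem.Str.toList_join, show ("".toList) = ([] : List Char) from rfl, pv_join_empty_eq_flatten]
  rw [lhs, rhs, hmain]

-- ===== VERDICT (by name: the statement is the Claim_ definition above) =====
theorem positions_to_str_spec : Claim_equal_positions_to_str := by
  intro rp d _
  unfold Spec_positions_to_str positions_to_str positions_to_str_alt
  refine congrArg _ (List.map_congr_left fun x _ => ?_)
  exact pv_row_eq rp x d.2
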